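-- pv_equiv track=rewrite | github.com/rudvfaden/AdventOfCode | 2025/day6/day6.py | parse_cephalopod_worksheet
-- ===== SOURCE A (Python) =====
-- def parse_cephalopod_worksheet(lines):
--     """Parse the worksheet by finding column separators and extracting problems"""
--     # Remove empty lines and strip newlines, get number rows (all except last which has operators)
--     clean_lines = [line.rstrip('\n') for line in lines if line.strip()]
--     number_lines = clean_lines[:-1]
--     operator_line = clean_lines[-1]
--
--     # Pad all lines to same length
--     max_len = max(len(line) for line in number_lines + [operator_line])
--     padded_numbers = [line.ljust(max_len) for line in number_lines]
--     padded_operator = operator_line.ljust(max_len)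
--
--     # Find column separators (all spaces in number rows)
--     separators = []
--     for pos in range(max_len):
--         if all(line[pos] == ' ' for line in padded_numbers):
--             separators.append(pos)
--
--     # Split into problem sections
--     problems = []
--     start = 0
--     for sep in separators + [max_len]:
--         if start < sep:
--             # Extract this problem section
--             problem_chars = []
--             for line in padded_numbers:
--                 problem_chars.append(line[start:sep])
--             operator = padded_operator[start:sep].strip()
--             if operator:
--                 problems.append((problem_chars, operator))
--         start = sep + 1
--
--     return problems
-- ===== SOURCE B (Python) =====
-- def parse_cephalopod_worksheet(lines):
--     """Parse the worksheet in one streaming pass over the transposed columns."""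
--     clean = [line.rstrip('\n') for line in lines if line.strip()]
--     number_lines = clean[:-1]
--     operator_line = clean[-1]
--
--     width = max(len(line) for line in clean)
--     rows = [line.ljust(width) for line in number_lines]
--     op_row = operator_line.ljust(width)
--
--     problems = []
--     start = None  # start column of the current open block, or None
--     for pos in range(width + 1):
--         if pos == width or all(row[pos] == ' ' for row in rows):
--             # separator column (or end of sheet): close the open block, if any
--             if start is not None:
--                 op = op_row[start:pos].strip()
--                 if op:
--                     problems.append(([row[start:pos] for row in rows], op))
--                 start = None
--         elif start is None:
--             start = pos
--     return problems
-- ===== Notes on version B (the rewrite author's own statement) =====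
-- stated objective: simpler
-- what changed: Replaces A's two-phase scheme (collect the list of all separator columns, then re-split with a start pointer over separators+[max_len]) by a single streaming pass over the columns that opens a block at the first non-separator column and flushes it at the next separator or at the end.
import Mathlib
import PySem

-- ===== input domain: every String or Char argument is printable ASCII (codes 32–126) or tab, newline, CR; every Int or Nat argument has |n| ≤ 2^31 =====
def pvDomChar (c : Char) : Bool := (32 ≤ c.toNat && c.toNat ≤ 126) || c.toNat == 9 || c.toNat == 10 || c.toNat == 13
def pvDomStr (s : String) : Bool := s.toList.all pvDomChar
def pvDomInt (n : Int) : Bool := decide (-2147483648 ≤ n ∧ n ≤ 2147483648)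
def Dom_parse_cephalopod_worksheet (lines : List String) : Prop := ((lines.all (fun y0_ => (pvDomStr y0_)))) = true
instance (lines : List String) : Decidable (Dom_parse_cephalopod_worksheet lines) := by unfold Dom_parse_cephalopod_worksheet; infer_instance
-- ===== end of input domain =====

-- B replaces A's two-phase (collect all separator columns, then split by a start pointer)
-- with a single streaming pass over the columns that opens and flushes blocks on the fly;
-- objective: simpler.

-- ===== PORT A =====
-- shared helpers: these transliterate code fragments that appear verbatim in BOTH Pythons
-- s.rstrip('\n') : drop only trailing newline characters
def pvRstripNl (s : String) : String :=
  String.ofList ((s.toList.reverse.dropWhile (fun c => c == '\n')).reverse)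

-- s.ljust(n) : pad on the right with spaces to length n (unchanged if already longer)
def pvLjust (s : String) (n : Nat) : String :=
  String.ofList (s.toList ++ List.replicate (n - s.toList.length) ' ')

-- all(line[pos] == ' ' for line in rows) : exact because rows are padded to a common
-- width and pos < width whenever this is evaluated, so the getD default is never used
def pvIsSep (rows : List String) (pos : Nat) : Bool :=
  rows.all (fun l => l.toList.getD pos ' ' == ' ')

-- the block-extraction fragment both Pythons share: slice every row and the operator row
-- over [a:b] (0 ≤ a ≤ b, exact as drop/take), strip the operator, skip if it is empty
def pvFlush (rows : List String) (opRow : String)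
    (probs : List (List String × String)) (a b : Nat) : List (List String × String) :=
  let op := PySem.Str.strip (String.ofList ((opRow.toList.drop a).take (b - a)))
  if op ≠ "" then
    probs ++ [(rows.map (fun l => String.ofList ((l.toList.drop a).take (b - a))), op)]
  else probs

def parse_cephalopod_worksheet (lines : List String) : List (List String × String) :=
  let clean := (lines.filter (fun l => !(PySem.Str.strip l == ""))).map pvRstripNl
  let number_lines := PySem.List.slice clean none (some (-1))
  -- clean[-1]: IndexError when clean = [] — exactly the inputs Pre_ excludes
  let operator_line := PySem.List.pyGetD clean (-1) ""
  -- max(...) over a list that is nonempty under Pre_; foldl max 0 is exact on Nat lengths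
  let max_len := ((number_lines ++ [operator_line]).map (fun l => l.toList.length)).foldl max 0
  let padded_numbers := number_lines.map (fun l => pvLjust l max_len)
  let padded_operator := pvLjust operator_line max_len
  let separators := (List.range max_len).foldl
    (fun acc pos => if pvIsSep padded_numbers pos then acc ++ [pos] else acc) []
  ((separators ++ [max_len]).foldl
    (fun (st : Nat × List (List String × String)) sep =>
      if st.1 < sep then (sep + 1, pvFlush padded_numbers padded_operator st.2 st.1 sep)
      else (sep + 1, st.2))
    (0, [])).2

-- ===== PORT B =====
def parse_cephalopod_worksheet_alt (lines : List String) : List (List String × String) :=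
  let clean := (lines.filter (fun l => !(PySem.Str.strip l == ""))).map pvRstripNl
  let number_lines := PySem.List.slice clean none (some (-1))
  let operator_line := PySem.List.pyGetD clean (-1) ""
  let width := (clean.map (fun l => l.toList.length)).foldl max 0
  let rows := number_lines.map (fun l => pvLjust l width)
  let opRow := pvLjust operator_line width
  ((List.range (width + 1)).foldl
    (fun (st : Option Nat × List (List String × String)) pos =>
      if pos == width || pvIsSep rows pos then
        match st.1 with
        | some s => (none, pvFlush rows opRow st.2 s pos)
        | none => (none, st.2)
      else
        match st.1 with
        | none => (some pos, st.2)
        | some s => (some s, st.2))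
    (none, [])).2

-- ===== PRECONDITION & SPEC =====
-- Pre_ excludes exactly the inputs whose lines are all blank: there both Pythons raise
-- IndexError on clean[-1].
def Pre_parse_cephalopod_worksheet (lines : List String) : Prop :=
  (lines.any (fun l => !(PySem.Str.strip l == ""))) = true
instance (lines : List String) : Decidable (Pre_parse_cephalopod_worksheet lines) := by
  unfold Pre_parse_cephalopod_worksheet; infer_instance

def pvWitness_parse_cephalopod_worksheet : List String := ["1 2", "+ *"]

def Spec_parse_cephalopod_worksheet (lines : List String) (out : List (List String × String)) : Prop := out = parse_cephalopod_worksheet_alt lines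
instance (lines : List String) (out : List (List String × String)) : Decidable (Spec_parse_cephalopod_worksheet lines out) := by unfold Spec_parse_cephalopod_worksheet; infer_instance

-- ===== CLAIM (what is proved, stated in full; the proofs are below) =====
def Claim_equal_parse_cephalopod_worksheet : Prop := ∀ (lines : List String), Dom_parse_cephalopod_worksheet lines → Pre_parse_cephalopod_worksheet lines → Spec_parse_cephalopod_worksheet lines (parse_cephalopod_worksheet lines)

-- ===== LEMMAS AND PROOFS =====

-- A's loop step over the separator list
def pvStepA (rows : List String) (opRow : String)
    (st : Nat × List (List String × String)) (sep : Nat) : Nat × List (List String × String) :=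
  if st.1 < sep then (sep + 1, pvFlush rows opRow st.2 st.1 sep) else (sep + 1, st.2)

-- B's loop step over all columns (n = width)
def pvStepB (n : Nat) (rows : List String) (opRow : String)
    (st : Option Nat × List (List String × String)) (pos : Nat) :
    Option Nat × List (List String × String) :=
  if pos == n || pvIsSep rows pos then
    match st.1 with
    | some s => (none, pvFlush rows opRow st.2 s pos)
    | none => (none, st.2)
  else
    match st.1 with
    | none => (some pos, st.2)
    | some s => (some s, st.2)

-- loop invariant tying A's fold over the separator sublist to B's fold over all columns
lemma pvInv (rows : List String) (opRow : String) (n : Nat) :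
    ∀ k, k ≤ n →
      (((List.range k).filter (fun p => pvIsSep rows p)).foldl (pvStepA rows opRow) (0, [])).2
        = ((List.range k).foldl (pvStepB n rows opRow) (none, [])).2
      ∧ (((List.range k).filter (fun p => pvIsSep rows p)).foldl (pvStepA rows opRow) (0, [])).1 ≤ k
      ∧ ((List.range k).foldl (pvStepB n rows opRow) (none, [])).1
          = (if (((List.range k).filter (fun p => pvIsSep rows p)).foldl (pvStepA rows opRow) (0, [])).1 < k
             then some ((((List.range k).filter (fun p => pvIsSep rows p)).foldl (pvStepA rows opRow) (0, [])).1)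
             else none)
      ∧ ∀ j, (((List.range k).filter (fun p => pvIsSep rows p)).foldl (pvStepA rows opRow) (0, [])).1 ≤ j →
          j < k → pvIsSep rows j = false := by
  intro k
  induction k with
  | zero => intro _; simp
  | succ k ih =>
    intro hk
    obtain ⟨h2, hle, ho, hns⟩ := ih (Nat.le_of_succ_le hk)
    set a := ((List.range k).filter (fun p => pvIsSep rows p)).foldl (pvStepA rows opRow) (0, []) with ha
    set b := (List.range k).foldl (pvStepB n rows opRow) (none, []) with hb
    have hkn : (k == n) = false := by simp [Nat.ne_of_lt hk]
    by_cases hsep : pvIsSep rows k = true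
    · -- column k is a separator: A records it (stepA fires), B flushes
      have eA : ((List.range (k + 1)).filter (fun p => pvIsSep rows p)).foldl (pvStepA rows opRow) (0, [])
          = pvStepA rows opRow a k := by
        rw [List.range_succ, List.filter_append, List.foldl_append, ← ha]
        simp [hsep]
      have eB : (List.range (k + 1)).foldl (pvStepB n rows opRow) (none, []) = pvStepB n rows opRow b k := by
        rw [List.range_succ, List.foldl_append, ← hb]; rfl
      rw [eA, eB]
      by_cases hlt : a.1 < k
      · refine ⟨?_, ?_, ?_, ?_⟩
        · simp [pvStepA, pvStepB, hsep, hlt, ho, h2]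
        · simp [pvStepA, hlt]
        · simp [pvStepA, pvStepB, hsep, hlt, ho]
        · intro j h1j h2j
          simp only [pvStepA, hlt, if_pos] at h1j
          omega
      · refine ⟨?_, ?_, ?_, ?_⟩
        · simp [pvStepA, pvStepB, hsep, hlt, ho, h2]
        · simp [pvStepA, hlt]
        · simp [pvStepA, pvStepB, hsep, hlt, ho]
        · intro j h1j h2j
          simp only [pvStepA, hlt, if_neg, not_false_iff] at h1j
          omega
    · -- column k is not a separator: A skips it, B possibly opens a block at k
      have hsepf : pvIsSep rows k = false := by simpa using hsep
      have eA : ((List.range (k + 1)).filter (fun p => pvIsSep rows p)).foldl (pvStepA rows opRow) (0, []) = a := by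
        rw [List.range_succ, List.filter_append, List.foldl_append, ← ha]
        simp [hsepf]
      have eB : (List.range (k + 1)).foldl (pvStepB n rows opRow) (none, []) = pvStepB n rows opRow b k := by
        rw [List.range_succ, List.foldl_append, ← hb]; rfl
      rw [eA, eB]
      have hext : ∀ j, a.1 ≤ j → j < k + 1 → pvIsSep rows j = false := by
        intro j h1j h2j
        rcases Nat.lt_or_ge j k with h | h
        · exact hns j h1j h
        · have : j = k := by omega
          subst this; exact hsepf
      by_cases hlt : a.1 < k
      · refine ⟨?_, by omega, ?_, hext⟩
        · simp [pvStepB, hkn, hsepf, ho, hlt, h2]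
        · simp [pvStepB, hkn, hsepf, ho, hlt]
          omega
      · have hak : a.1 = k := by omega
        refine ⟨?_, by omega, ?_, hext⟩
        · simp [pvStepB, hkn, hsepf, ho, hlt, h2]
        · simp [pvStepB, hkn, hsepf, ho, hak]

-- the full loops agree
lemma pvCore (rows : List String) (opRow : String) (n : Nat) :
    ((((List.range n).foldl (fun acc pos => if pvIsSep rows pos then acc ++ [pos] else acc) []) ++ [n]).foldl
        (pvStepA rows opRow) (0, [])).2
      = ((List.range (n + 1)).foldl (pvStepB n rows opRow) (none, [])).2 := by
  have hfilt : (List.range n).foldl (fun acc pos => if pvIsSep rows pos then acc ++ [pos] else acc) []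
      = (List.range n).filter (fun p => pvIsSep rows p) := by
    simpa using PySem.List.foldl_append_if (fun p => pvIsSep rows p) (fun x => x) (List.range n) []
  obtain ⟨h2, hle, ho, _⟩ := pvInv rows opRow n n (Nat.le_refl n)
  set a := ((List.range n).filter (fun p => pvIsSep rows p)).foldl (pvStepA rows opRow) (0, []) with ha
  set b := (List.range n).foldl (pvStepB n rows opRow) (none, []) with hb
  have eA : (((List.range n).filter (fun p => pvIsSep rows p)) ++ [n]).foldl (pvStepA rows opRow) (0, [])
      = pvStepA rows opRow a n := by rw [List.foldl_append, ← ha]; rfl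
  have eB : (List.range (n + 1)).foldl (pvStepB n rows opRow) (none, []) = pvStepB n rows opRow b n := by
    rw [List.range_succ, List.foldl_append, ← hb]; rfl
  rw [hfilt, eA, eB]
  by_cases hlt : a.1 < n
  · simp [pvStepA, pvStepB, hlt, ho, h2]
  · simp [pvStepA, pvStepB, hlt, ho, h2]

-- ===== VERDICT (by name: the statement is the Claim_ definition above) =====
theorem parse_cephalopod_worksheet_spec : Claim_equal_parse_cephalopod_worksheet := by
  intro lines _hDom hPre
  unfold Spec_parse_cephalopod_worksheet parse_cephalopod_worksheet parse_cephalopod_worksheet_alt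
  set clean := (lines.filter (fun l => !(PySem.Str.strip l == ""))).map pvRstripNl with hclean
  have hne : clean ≠ [] := by
    rw [hclean]
    simp only [ne_eq, List.map_eq_nil_iff, List.filter_eq_nil_iff, not_forall]
    rw [Pre_parse_cephalopod_worksheet, List.any_eq_true] at hPre
    obtain ⟨l, hl, hsl⟩ := hPre
    exact ⟨l, hl, by simp [hsl]⟩
  have h1 : PySem.List.slice clean none (some (-1)) = clean.dropLast :=
    PySem.List.slice_to_neg_one clean
  have h2 : PySem.List.pyGetD clean (-1) "" = clean.getLast hne :=
    PySem.List.pyGetD_neg_one clean "" hne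
  have h3 : clean.dropLast ++ [clean.getLast hne] = clean := List.dropLast_concat_getLast hne
  simp only [h1, h2]
  rw [h3]
  have hc := pvCore (clean.dropLast.map (fun l => pvLjust l ((clean.map (fun l => l.toList.length)).foldl max 0)))
    (pvLjust (clean.getLast hne) ((clean.map (fun l => l.toList.length)).foldl max 0))
    ((clean.map (fun l => l.toList.length)).foldl max 0)
  unfold pvStepA pvStepB at hc
  exact hc
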